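-- pv_equiv track=rewrite | github.com/sethluby/msp-ansible-platform | scripts/yaml_indent_fix.py | fix_module_arg_indentation
-- ===== SOURCE A (Python) =====
-- from typing import List, Tuple
--
-- def _indent(s: str, n: int) -> str:
--     return (" " * n) + s.strip() + "\n"
--
-- def fix_module_arg_indentation(lines: List[str]) -> List[str]:
--     """Ensure module argument mappings are indented two spaces deeper than the module line.
--
--     Example:
--       ansible.builtin.copy:
--       dest: /path   # becomes indented under module
--     """
--     i = 0
--     out: List[str] = []
--     TASK_LEVEL_KEYS = {
--         "register",
--         "changed_when",
--         "failed_when",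
--         "when",
--         "notify",
--         "loop",
--         "with_items",
--         "with_dict",
--         "with_list",
--         "loop_control",
--         "delegate_to",
--         "retries",
--         "delay",
--         "until",
--         "tags",
--         "vars",
--         "environment",
--     }
--
--     while i < len(lines):
--         line = lines[i]
--         stripped = line.strip()
--         out.append(line)
--         i += 1
--         # Detect a module or mapping line: 'module:' or 'module: |' or 'module: >-'
--         if (stripped.endswith(":") or stripped.endswith(":|") or stripped.endswith(": |") or stripped.endswith(":>") or stripped.endswith(": >") or stripped.endswith(":>-")) and not stripped.startswith("-"):
--             # Potential mapping key or module line.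
--             key = stripped[:-1].strip()
--             if "." in key or key in {"ansible", "command", "shell"}:
--                 module_indent = len(line) - len(line.lstrip())
--                 # Re-indent following argument lines that are at the same indent level.
--                 start = i
--                 while i < len(lines):
--                     nxt = lines[i]
--                     nstrip = nxt.strip()
--                     nindent = len(nxt) - len(nxt.lstrip())
--                     if not nstrip:
--                         out.append(nxt)
--                         i += 1
--                         continue
--                     # Stop only if we dedent below module (next section/task)
--                     if nindent < module_indent:
--                         break
--                     # If task-level key encountered at module indent, stop module args
--                     if nindent == module_indent and nstrip.endswith(":") and nstrip.split(":", 1)[0] in TASK_LEVEL_KEYS: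
--                         break
--                     # If this looks like a module arg or scalar content and is not deeper, bump indent
--                     if nindent == module_indent:
--                         out.append(_indent(nstrip, module_indent + 2))
--                     else:
--                         out.append(nxt)
--                     i += 1
--                 continue
--     return out
-- ===== SOURCE B (Python) =====
-- from typing import List
--
-- def _indent(s: str, n: int) -> str:
--     return (" " * n) + s.strip() + "\n"
--
-- TASK_LEVEL_KEYS = {
--     "register", "changed_when", "failed_when", "when", "notify", "loop",
--     "with_items", "with_dict", "with_list", "loop_control", "delegate_to",
--     "retries", "delay", "until", "tags", "vars", "environment",
-- }
--
-- def fix_module_arg_indentation(lines: List[str]) -> List[str]: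
--     """Flat single loop with an explicit in-block flag instead of a nested inner loop."""
--     out: List[str] = []
--     in_block = False
--     module_indent = 0
--     for line in lines:
--         stripped = line.strip()
--         if in_block:
--             if not stripped:
--                 out.append(line)
--                 continue
--             nindent = len(line) - len(line.lstrip())
--             if nindent < module_indent or (
--                 nindent == module_indent
--                 and stripped.endswith(":")
--                 and stripped.split(":", 1)[0] in TASK_LEVEL_KEYS
--             ):
--                 in_block = False  # block ends; this line falls through to outer handling
--             elif nindent == module_indent:
--                 out.append(_indent(stripped, module_indent + 2))
--                 continue
--             else:
--                 out.append(line)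
--                 continue
--         out.append(line)
--         if (stripped.endswith(":") or stripped.endswith(":|") or stripped.endswith(": |")
--                 or stripped.endswith(":>") or stripped.endswith(": >") or stripped.endswith(":>-")) \
--                 and not stripped.startswith("-"):
--             key = stripped[:-1].strip()
--             if "." in key or key in {"ansible", "command", "shell"}:
--                 module_indent = len(line) - len(line.lstrip())
--                 in_block = True
--     return out
-- ===== Notes on version B (the rewrite author's own statement) =====
-- stated objective: alternative
-- what changed: Replaces A's nested inner while-loop sharing an index with the outer loop by a single flat pass over the lines driven by an explicit in-block flag and remembered module indent (a mode-flag state machine); the block-terminating line is re-classified by falling through to the outer handling instead of break-then-continue.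
import Mathlib
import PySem

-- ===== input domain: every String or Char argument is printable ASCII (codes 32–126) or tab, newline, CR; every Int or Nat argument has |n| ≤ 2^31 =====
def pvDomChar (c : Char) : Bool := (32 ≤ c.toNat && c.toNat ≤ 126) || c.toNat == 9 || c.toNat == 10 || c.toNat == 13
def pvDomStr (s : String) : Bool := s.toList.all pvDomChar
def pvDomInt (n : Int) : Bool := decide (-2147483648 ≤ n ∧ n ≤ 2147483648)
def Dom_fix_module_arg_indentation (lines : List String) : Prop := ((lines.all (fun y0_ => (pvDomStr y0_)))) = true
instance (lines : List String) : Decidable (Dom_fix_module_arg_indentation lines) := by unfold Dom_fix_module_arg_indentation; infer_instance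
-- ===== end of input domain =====

-- B replaces A's nested inner while-loop over a shared index by a single flat loop with an
-- explicit in-block flag (a mode-flag state machine); same output, different decomposition.

-- ===== PORT A =====
-- shared transliterations of the helpers/conditions both Python sources contain verbatim
def pvTaskLevelKeys : List String :=
  ["register", "changed_when", "failed_when", "when", "notify", "loop",
   "with_items", "with_dict", "with_list", "loop_control", "delegate_to",
   "retries", "delay", "until", "tags", "vars", "environment"]

-- _indent(s, n) = " "*n + s.strip() + "\n"
def pyIndentHelper (s : String) (n : Int) : String :=
  String.ofList (List.replicate n.toNat ' ' ++ (PySem.Str.strip s).toList ++ ['\n'])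

-- len(line) - len(line.lstrip())
def pvIndentOf (line : String) : Int :=
  PySem.Str.len line - PySem.Str.len (PySem.Str.lstrip line)

-- the module/mapping-header test on the stripped line
def pvIsHeader (stripped : String) : Bool :=
  (PySem.Str.endswith stripped ":" || PySem.Str.endswith stripped ":|" ||
   PySem.Str.endswith stripped ": |" || PySem.Str.endswith stripped ":>" ||
   PySem.Str.endswith stripped ": >" || PySem.Str.endswith stripped ":>-") &&
  !(PySem.Str.startswith stripped "-")

-- key = stripped[:-1].strip();  "." in key or key in {"ansible", "command", "shell"}
def pvKeyOk (stripped : String) : Bool :=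
  let key := PySem.Str.strip (PySem.Str.slice stripped none (some (-1)))
  PySem.Str.isIn "." key || key == "ansible" || key == "command" || key == "shell"

-- nstrip.endswith(":") and nstrip.split(":", 1)[0] in TASK_LEVEL_KEYS
def pvIsTaskKey (nstrip : String) : Bool :=
  PySem.Str.endswith nstrip ":" &&
  pvTaskLevelKeys.contains ((((PySem.Str.splitMax? nstrip ":" 1).getD []).headD ""))

-- A's inner while-loop: consumes argument lines, returns (lines appended to out, remaining lines)
def aInner (mi : Int) : List String → List String × List String
  | [] => ([], [])
  | nxt :: rest =>
    let nstrip := PySem.Str.strip nxt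
    let nindent := pvIndentOf nxt
    if nstrip == "" then
      let p := aInner mi rest
      (nxt :: p.1, p.2)
    else if nindent < mi then ([], nxt :: rest)
    else if nindent == mi && pvIsTaskKey nstrip then ([], nxt :: rest)
    else if nindent == mi then
      let p := aInner mi rest
      (pyIndentHelper nstrip (mi + 2) :: p.1, p.2)
    else
      let p := aInner mi rest
      (nxt :: p.1, p.2)

-- A's outer while-loop; the Nat fuel (initially lines.length) is only a totality guard:
-- each outer iteration consumes at least one line, so fuel never runs out
def aOuter : Nat → List String → List String
  | _, [] => []
  | 0, _ => []   -- unreachable when fuel ≥ length of the list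
  | fuel + 1, line :: rest =>
    let stripped := PySem.Str.strip line
    if pvIsHeader stripped && pvKeyOk stripped then
      let mi := pvIndentOf line
      let p := aInner mi rest
      line :: (p.1 ++ aOuter fuel p.2)
    else
      line :: aOuter fuel rest

def fix_module_arg_indentation (lines : List String) : List String :=
  aOuter lines.length lines

-- ===== PORT B =====
-- B's outer (not-in-block) handling: append the line, test the header condition, set flag/indent
def bEnter (mi : Int) (out : List String) (line stripped : String) : Bool × Int × List String :=
  if pvIsHeader stripped && pvKeyOk stripped then
    (true, pvIndentOf line, out ++ [line])
  else
    (false, mi, out ++ [line])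

-- one step of B's flat loop; state = (in_block, module_indent, out); a block-terminating line
-- falls through to bEnter, i.e. is re-classified in outer mode
def bStep (st : Bool × Int × List String) (line : String) : Bool × Int × List String :=
  let stripped := PySem.Str.strip line
  if st.1 then
    if stripped == "" then (true, st.2.1, st.2.2 ++ [line])
    else
      let nindent := pvIndentOf line
      if nindent < st.2.1 || (nindent == st.2.1 && pvIsTaskKey stripped) then
        bEnter st.2.1 st.2.2 line stripped
      else if nindent == st.2.1 then
        (true, st.2.1, st.2.2 ++ [pyIndentHelper stripped (st.2.1 + 2)])
      else (true, st.2.1, st.2.2 ++ [line])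
  else bEnter st.2.1 st.2.2 line stripped

def fix_module_arg_indentation_alt (lines : List String) : List String :=
  (lines.foldl bStep (false, 0, [])).2.2

-- ===== PRECONDITION & SPEC =====
def Spec_fix_module_arg_indentation (lines : List String) (out : List String) : Prop := out = fix_module_arg_indentation_alt lines
instance (lines : List String) (out : List String) : Decidable (Spec_fix_module_arg_indentation lines out) := by unfold Spec_fix_module_arg_indentation; infer_instance

-- ===== CLAIM (what is proved, stated in full; the proofs are below) =====
def Claim_equal_fix_module_arg_indentation : Prop := ∀ (lines : List String), Dom_fix_module_arg_indentation lines → Spec_fix_module_arg_indentation lines (fix_module_arg_indentation lines)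

-- ===== LEMMAS AND PROOFS =====

theorem aInner_snd_length (mi : Int) (xs : List String) : (aInner mi xs).2.length ≤ xs.length := by
  induction xs with
  | nil => simp [aInner]
  | cons x xs ih =>
    simp only [aInner]
    split_ifs <;> simp <;> omega

-- running B in block mode over xs: emit A's inner-loop output, then resume in outer mode on
-- A's inner-loop remainder (the stopping line is handled by bEnter on both sides)
theorem foldl_bStep_true (mi : Int) (out : List String) (xs : List String) :
    (List.foldl bStep (true, mi, out) xs).2.2
      = (List.foldl bStep (false, mi, out ++ (aInner mi xs).1) (aInner mi xs).2).2.2 := by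
  induction xs generalizing out with
  | nil => simp [aInner]
  | cons x xs ih =>
    by_cases h1 : (PySem.Str.strip x == "") = true
    · have ha : aInner mi (x :: xs) = ((x :: (aInner mi xs).1), (aInner mi xs).2) := by
        simp [aInner, h1]
      have hb : bStep (true, mi, out) x = (true, mi, out ++ [x]) := by
        simp [bStep, h1]
      rw [ha, List.foldl_cons, hb, ih (out ++ [x])]
      simp
    · by_cases h2 : pvIndentOf x < mi
      · have ha : aInner mi (x :: xs) = ([], x :: xs) := by
          simp [aInner, h1, h2]
        have hb : bStep (true, mi, out) x = bEnter mi out x (PySem.Str.strip x) := by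
          simp [bStep, h1, h2]
        have hb' : bStep (false, mi, out) x = bEnter mi out x (PySem.Str.strip x) := by
          simp [bStep]
        rw [ha, List.foldl_cons, hb]
        rw [List.append_nil, List.foldl_cons, hb']
      · by_cases h3 : (pvIndentOf x == mi && pvIsTaskKey (PySem.Str.strip x)) = true
        · have ha : aInner mi (x :: xs) = ([], x :: xs) := by
            simp only [aInner]
            rw [if_neg (by simp [h1]), if_neg (by omega), if_pos h3]
          have hb : bStep (true, mi, out) x = bEnter mi out x (PySem.Str.strip x) := by
            simp [bStep, h1, h2, h3]
          have hb' : bStep (false, mi, out) x = bEnter mi out x (PySem.Str.strip x) := by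
            simp [bStep]
          rw [ha, List.append_nil, List.foldl_cons, hb, List.foldl_cons, hb']
        · by_cases h4 : (pvIndentOf x == mi) = true
          · have ha : aInner mi (x :: xs)
                = (pyIndentHelper (PySem.Str.strip x) (mi + 2) :: (aInner mi xs).1, (aInner mi xs).2) := by
              simp only [aInner]
              rw [if_neg (by simp [h1]), if_neg (by omega), if_neg (by simp [h3]), if_pos h4]
            have htk : pvIsTaskKey (PySem.Str.strip x) ≠ true := by
              intro h; exact h3 (by simp [h4, h])
            have hb : bStep (true, mi, out) x
                = (true, mi, out ++ [pyIndentHelper (PySem.Str.strip x) (mi + 2)]) := by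
              simp [bStep, h1, h2, h4, htk]
            rw [ha, List.foldl_cons, hb, ih]
            simp
          · have ha : aInner mi (x :: xs) = ((x :: (aInner mi xs).1), (aInner mi xs).2) := by
              simp only [aInner]
              rw [if_neg (by simp [h1]), if_neg (by omega), if_neg (by simp [h3]), if_neg (by simp [h4])]
            have hb : bStep (true, mi, out) x = (true, mi, out ++ [x]) := by
              simp [bStep, h1, h2, h4]
            rw [ha, List.foldl_cons, hb, ih]
            simp

-- running B in outer mode accumulates exactly A's outer-loop output
theorem foldl_bStep_false (n : Nat) :
    ∀ (xs : List String), xs.length ≤ n → ∀ (mi : Int) (out : List String),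
      (List.foldl bStep (false, mi, out) xs).2.2 = out ++ aOuter n xs := by
  induction n with
  | zero =>
    intro xs hxs mi out
    have hx : xs = [] := List.eq_nil_of_length_eq_zero (Nat.le_zero.mp hxs)
    subst hx; simp [aOuter]
  | succ n ih =>
    intro xs hxs mi out
    match xs with
    | [] => simp [aOuter]
    | line :: rest =>
      have hb : bStep (false, mi, out) line = bEnter mi out line (PySem.Str.strip line) := by
        simp [bStep]
      rw [List.foldl_cons, hb]
      by_cases h : (pvIsHeader (PySem.Str.strip line) && pvKeyOk (PySem.Str.strip line)) = true
      · rw [show bEnter mi out line (PySem.Str.strip line)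
              = (true, pvIndentOf line, out ++ [line]) by simp [bEnter, h]]
        rw [foldl_bStep_true]
        have hlen : (aInner (pvIndentOf line) rest).2.length ≤ n := by
          have := aInner_snd_length (pvIndentOf line) rest
          simp at hxs; omega
        rw [ih _ hlen]
        simp only [aOuter, h, if_pos]
        simp
      · rw [show bEnter mi out line (PySem.Str.strip line) = (false, mi, out ++ [line]) by
          simp [bEnter, h]]
        have hlen : rest.length ≤ n := by simp at hxs; omega
        rw [ih _ hlen]
        simp only [aOuter, h, if_neg, Bool.false_eq_true, not_false_iff]
        simp

-- ===== VERDICT (by name: the statement is the Claim_ definition above) =====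
theorem fix_module_arg_indentation_spec : Claim_equal_fix_module_arg_indentation := by
  intro lines _
  unfold Spec_fix_module_arg_indentation fix_module_arg_indentation fix_module_arg_indentation_alt
  rw [foldl_bStep_false lines.length lines le_rfl 0 [], List.nil_append]
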